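-- pv_equiv track=rewrite | github.com/Lefie/Coding-Interview | two_pointers/minimum_window_sort.py | min_window_sort
-- ===== SOURCE A (Python) =====
-- import math
--
-- def min_window_sort(arr):
--
--     low = 0 #we define a pointer that points to the low end , moving from left to right
--     high = len(arr) - 1 #we define a pointer to the high end, moving from right to left
--
--     while (low < len(arr) - 1 and arr[low] <= arr[low + 1]): #checking to make sure that low is not going out of bound and that everything is in ascending order
--         low += 1 #keep updating until we find the element that is out of order
--
--     if low == len(arr) - 1: # in the case that the array is already sorted
--         return 0
--
--     while (high > 0 and arr[high] >= arr[high - 1]): #chekcing to make sure high does not go out of bound and everything is in ascending order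
--         high -= 1 #keep updating until we find the element that is out of order
--
-- # now we look for the max and min of the subarray
--     sub_max = -math.inf
--     sub_min = math.inf
--
--     for k in range(low,high+1):
--         sub_max = max(arr[k],sub_max)
--         sub_min = min(arr[k],sub_min)
--
-- #now we compare the boundary elements to our new found min and max of the subarray to see if there is a need to extend the subarray
--
--     while low > 0 and arr[low - 1] > sub_min:
--         low -= 1
--
--     while high < len(arr)-1 and arr[high + 1] < sub_max :
--         high += 1
--
--     return high - low + 1
-- ===== SOURCE B (Python) =====
-- def min_window_sort(arr):
--     n = len(arr)
--     # right-to-left sweep: i = leftmost index whose value exceeds the minimum of the elements after it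
--     i = None
--     suffix_min = None
--     for k in range(n - 1, -1, -1):
--         if suffix_min is not None and arr[k] > suffix_min:
--             i = k
--         if suffix_min is None or arr[k] < suffix_min:
--             suffix_min = arr[k]
--     if i is None:
--         return 0
--     # left-to-right sweep: j = rightmost index whose value is below the maximum of the elements before it
--     j = 0
--     prefix_max = None
--     for k in range(n):
--         if prefix_max is not None and arr[k] < prefix_max:
--             j = k
--         if prefix_max is None or arr[k] > prefix_max:
--             prefix_max = arr[k]
--     return j - i + 1
-- ===== Notes on version B (the rewrite author's own statement) =====
-- stated objective: faster
-- what changed: Replaces A's four boundary/extension while-loops plus a window min-max pass by two symmetric linear sweeps: a running suffix-min finds the leftmost index exceeding the min of later elements, a running prefix-max finds the rightmost index below the max of earlier elements.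
import Mathlib
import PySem

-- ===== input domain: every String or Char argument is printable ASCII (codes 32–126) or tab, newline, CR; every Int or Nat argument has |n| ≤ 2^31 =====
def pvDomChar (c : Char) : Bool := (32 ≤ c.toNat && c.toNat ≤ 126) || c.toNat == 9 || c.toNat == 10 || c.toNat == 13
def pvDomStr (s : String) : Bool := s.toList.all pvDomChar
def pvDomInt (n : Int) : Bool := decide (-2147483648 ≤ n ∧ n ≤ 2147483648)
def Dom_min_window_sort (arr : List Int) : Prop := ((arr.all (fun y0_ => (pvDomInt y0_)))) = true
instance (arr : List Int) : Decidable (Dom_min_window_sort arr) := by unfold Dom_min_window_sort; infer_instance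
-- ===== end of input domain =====

-- B replaces A's boundary scans + window min/max + extension loops by two symmetric
-- running-extremum sweeps (alternative algorithm, same value on every input).
-- Note: every index either program reads is in range in Python; indexing is ported as
-- PySem.List.pyGetD _ _ 0, whose default 0 is never the value read.

-- ===== PORT A =====
-- while low < len(arr)-1 and arr[low] <= arr[low+1]: low += 1
def pvLowA (arr : List Int) (low : Int) : Int :=
  if _h : low < (arr.length : Int) - 1 ∧ PySem.List.pyGetD arr low 0 ≤ PySem.List.pyGetD arr (low + 1) 0 then
    pvLowA arr (low + 1)
  else low
termination_by ((arr.length : Int) - 1 - low).toNat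
decreasing_by omega

-- while high > 0 and arr[high] >= arr[high-1]: high -= 1
def pvHighA (arr : List Int) (high : Int) : Int :=
  if _h : high > 0 ∧ PySem.List.pyGetD arr (high - 1) 0 ≤ PySem.List.pyGetD arr high 0 then
    pvHighA arr (high - 1)
  else high
termination_by high.toNat
decreasing_by omega

-- max(x, acc) / min(x, acc) where acc may still be the -inf / +inf sentinel (modelled as none)
def pvMaxO (x : Int) (o : Option Int) : Option Int :=
  match o with | none => some x | some v => some (max x v)
def pvMinO (x : Int) (o : Option Int) : Option Int :=
  match o with | none => some x | some v => some (min x v)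
-- x > sub_min (false when sub_min is the +inf sentinel), x < sub_max (false when -inf)
def pvGtO (x : Int) (o : Option Int) : Bool :=
  match o with | none => false | some v => decide (v < x)
def pvLtO (x : Int) (o : Option Int) : Bool :=
  match o with | none => false | some v => decide (x < v)

-- while low > 0 and arr[low-1] > sub_min: low -= 1
def pvLowExtA (arr : List Int) (smin : Option Int) (low : Int) : Int :=
  if _h : low > 0 ∧ pvGtO (PySem.List.pyGetD arr (low - 1) 0) smin = true then
    pvLowExtA arr smin (low - 1)
  else low
termination_by low.toNat
decreasing_by omega

-- while high < len(arr)-1 and arr[high+1] < sub_max: high += 1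
def pvHighExtA (arr : List Int) (smax : Option Int) (high : Int) : Int :=
  if _h : high < (arr.length : Int) - 1 ∧ pvLtO (PySem.List.pyGetD arr (high + 1) 0) smax = true then
    pvHighExtA arr smax (high + 1)
  else high
termination_by ((arr.length : Int) - 1 - high).toNat
decreasing_by omega

def min_window_sort (arr : List Int) : Int :=
  let low := pvLowA arr 0
  if low = (arr.length : Int) - 1 then 0
  else
    let high := pvHighA arr ((arr.length : Int) - 1)
    let mm := (PySem.List.pyRange low (high + 1) 1).foldl
      (fun st k => (pvMaxO (PySem.List.pyGetD arr k 0) st.1, pvMinO (PySem.List.pyGetD arr k 0) st.2))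
      (none, none)
    let low2 := pvLowExtA arr mm.2 low
    let high2 := pvHighExtA arr mm.1 high
    high2 - low2 + 1

-- ===== PORT B =====
-- body of 'for k in range(n-1, -1, -1)': state (i, suffix_min), None as none
def pvStepI (arr : List Int) (st : Option Int × Option Int) (k : Int) : Option Int × Option Int :=
  let v := PySem.List.pyGetD arr k 0
  let i := match st.2 with
    | some m => if m < v then some k else st.1
    | none => st.1
  let sm := match st.2 with
    | none => some v
    | some m => if v < m then some v else some m
  (i, sm)

-- body of 'for k in range(n)': state (j, prefix_max)
def pvStepJ (arr : List Int) (st : Int × Option Int) (k : Int) : Int × Option Int :=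
  let v := PySem.List.pyGetD arr k 0
  let j := match st.2 with
    | some m => if v < m then k else st.1
    | none => st.1
  let pm := match st.2 with
    | none => some v
    | some m => if m < v then some v else some m
  (j, pm)

def min_window_sort_alt (arr : List Int) : Int :=
  let n := (arr.length : Int)
  let st := (PySem.List.pyRange (n - 1) (-1) (-1)).foldl (pvStepI arr) (none, none)
  match st.1 with
  | none => 0
  | some i =>
    let st2 := (PySem.List.pyRange 0 n 1).foldl (pvStepJ arr) (0, none)
    st2.1 - i + 1

-- ===== PRECONDITION & SPEC =====
def Spec_min_window_sort (arr : List Int) (out : Int) : Prop := out = min_window_sort_alt arr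
instance (arr : List Int) (out : Int) : Decidable (Spec_min_window_sort arr out) := by unfold Spec_min_window_sort; infer_instance

-- ===== CLAIM (what is proved, stated in full; the proofs are below) =====
def Claim_equal_min_window_sort : Prop := ∀ (arr : List Int), Dom_min_window_sort arr → Spec_min_window_sort arr (min_window_sort arr)

-- ===== LEMMAS AND PROOFS =====

-- total accessor used throughout the proofs
def pvG (a : List Int) (i : Int) : Int := PySem.List.pyGetD a i 0

-- adjacent-ascending on [0, j)
def pvAscBelow (a : List Int) (j : Int) : Prop :=
  ∀ t : Int, 0 ≤ t → t < j → pvG a t ≤ pvG a (t + 1)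

-- a[t] is greater than some later element
def pvInv (a : List Int) (t : Int) : Prop :=
  ∃ l : Int, t < l ∧ l < (a.length : Int) ∧ pvG a l < pvG a t

-- a[t] is smaller than some earlier element
def pvJnv (a : List Int) (t : Int) : Prop :=
  ∃ l : Int, 0 ≤ l ∧ l < t ∧ pvG a t < pvG a l

lemma pvMonoGen (a : List Int) (lo hi : Int)
    (h : ∀ t : Int, lo ≤ t → t < hi → pvG a t ≤ pvG a (t + 1)) :
    ∀ s u : Int, lo ≤ s → s ≤ u → u ≤ hi → pvG a s ≤ pvG a u := by
  have key : ∀ (d : Nat) (s : Int), lo ≤ s → s + d ≤ hi → pvG a s ≤ pvG a (s + d) := by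
    intro d
    induction d with
    | zero => intro s _ _; simp
    | succ d ih =>
      intro s hs hle
      have h1 := ih s hs (by push_cast at hle ⊢; omega)
      have h2 := h (s + d) (by omega) (by push_cast at hle ⊢; omega)
      calc pvG a s ≤ pvG a (s + d) := h1
        _ ≤ pvG a (s + d + 1) := h2
        _ = pvG a (s + (d + 1 : Nat)) := by norm_num; ring_nf
  intro s u hs hsu huhi
  have := key (u - s).toNat s hs (by omega)
  rwa [show s + ((u - s).toNat : Int) = u by omega] at this

lemma pvLowA_spec (arr : List Int) (low : Int) (h0 : 0 ≤ low)
    (h1 : low ≤ (arr.length : Int) - 1) (hasc : pvAscBelow arr low) :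
    0 ≤ pvLowA arr low ∧ low ≤ pvLowA arr low ∧ pvLowA arr low ≤ (arr.length : Int) - 1 ∧
      pvAscBelow arr (pvLowA arr low) ∧
      (pvLowA arr low = (arr.length : Int) - 1 ∨
        pvG arr (pvLowA arr low + 1) < pvG arr (pvLowA arr low)) := by
  rw [pvLowA]
  split
  · rename_i h
    have ih : 0 ≤ pvLowA arr (low + 1) ∧ low + 1 ≤ pvLowA arr (low + 1) ∧
        pvLowA arr (low + 1) ≤ (arr.length : Int) - 1 ∧
        pvAscBelow arr (pvLowA arr (low + 1)) ∧
        (pvLowA arr (low + 1) = (arr.length : Int) - 1 ∨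
          pvG arr (pvLowA arr (low + 1) + 1) < pvG arr (pvLowA arr (low + 1))) :=
      pvLowA_spec arr (low + 1) (by omega) (by omega) (by
        intro t ht1 ht2
        rcases lt_or_eq_of_le (show t ≤ low by omega) with hlt | heq
        · exact hasc t ht1 hlt
        · subst heq; simpa [pvG] using h.2)
    obtain ⟨a1, a2, a3, a4, a5⟩ := ih
    exact ⟨by omega, by omega, a3, a4, a5⟩
  · rename_i h
    push_neg at h
    refine ⟨h0, le_refl _, h1, hasc, ?_⟩
    by_cases hl : low = (arr.length : Int) - 1
    · exact Or.inl hl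
    · right
      have := h (by omega)
      simpa [pvG] using this
termination_by ((arr.length : Int) - 1 - low).toNat
decreasing_by omega
lemma pvHighA_spec (arr : List Int) (high : Int) (h0 : 0 ≤ high)
    (h1 : high ≤ (arr.length : Int) - 1)
    (hasc : ∀ t : Int, high ≤ t → t < (arr.length : Int) - 1 → pvG arr t ≤ pvG arr (t + 1)) :
    0 ≤ pvHighA arr high ∧ pvHighA arr high ≤ high ∧
      (∀ t : Int, pvHighA arr high ≤ t → t < (arr.length : Int) - 1 → pvG arr t ≤ pvG arr (t + 1)) ∧
      (pvHighA arr high = 0 ∨ pvG arr (pvHighA arr high) < pvG arr (pvHighA arr high - 1)) := by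
  rw [pvHighA]
  split
  · rename_i h
    obtain ⟨a1, a2, a3, a4⟩ := pvHighA_spec arr (high - 1) (by omega) (by omega) (by
      intro t ht1 ht2
      rcases lt_or_eq_of_le (show high - 1 ≤ t from ht1) with hlt | heq
      · exact hasc t (by omega) ht2
      · rw [← heq]
        have : high - 1 + 1 = high := by omega
        rw [this]
        simpa [pvG] using h.2)
    exact ⟨a1, by omega, a3, a4⟩
  · rename_i h
    push_neg at h
    refine ⟨h0, le_refl _, hasc, ?_⟩
    by_cases hl : high = 0
    · exact Or.inl hl
    · right
      have := h (by omega)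
      simpa [pvG] using this
termination_by high.toNat
decreasing_by omega
lemma pvLowExtA_spec (arr : List Int) (m : Int) (low : Int) (h0 : 0 ≤ low) :
    0 ≤ pvLowExtA arr (some m) low ∧ pvLowExtA arr (some m) low ≤ low ∧
      (pvLowExtA arr (some m) low = 0 ∨ pvG arr (pvLowExtA arr (some m) low - 1) ≤ m) ∧
      (∀ t : Int, pvLowExtA arr (some m) low ≤ t → t < low → m < pvG arr t) := by
  rw [pvLowExtA]
  split
  · rename_i h
    have ih : 0 ≤ pvLowExtA arr (some m) (low - 1) ∧ pvLowExtA arr (some m) (low - 1) ≤ low - 1 ∧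
        (pvLowExtA arr (some m) (low - 1) = 0 ∨ pvG arr (pvLowExtA arr (some m) (low - 1) - 1) ≤ m) ∧
        (∀ t : Int, pvLowExtA arr (some m) (low - 1) ≤ t → t < low - 1 → m < pvG arr t) :=
      pvLowExtA_spec arr m (low - 1) (by omega)
    obtain ⟨a1, a2, a3, a4⟩ := ih
    refine ⟨a1, by omega, a3, ?_⟩
    intro t ht1 ht2
    rcases lt_or_eq_of_le (show t ≤ low - 1 by omega) with hlt | heq
    · exact a4 t ht1 hlt
    · subst heq
      have := h.2
      simp only [pvGtO, decide_eq_true_eq] at this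
      simpa [pvG] using this
  · rename_i h
    push_neg at h
    refine ⟨h0, le_refl _, ?_, by intro t ht1 ht2; omega⟩
    by_cases hl : low = 0
    · exact Or.inl hl
    · right
      have := h (by omega)
      simp [pvGtO] at this
      simp only [pvG]
      omega
termination_by low.toNat
decreasing_by omega

lemma pvHighExtA_spec (arr : List Int) (M : Int) (high : Int)
    (h1 : high ≤ (arr.length : Int) - 1) :
    high ≤ pvHighExtA arr (some M) high ∧ pvHighExtA arr (some M) high ≤ (arr.length : Int) - 1 ∧
      (pvHighExtA arr (some M) high = (arr.length : Int) - 1 ∨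
        M ≤ pvG arr (pvHighExtA arr (some M) high + 1)) ∧
      (∀ t : Int, high < t → t ≤ pvHighExtA arr (some M) high → pvG arr t < M) := by
  rw [pvHighExtA]
  split
  · rename_i h
    have ih : high + 1 ≤ pvHighExtA arr (some M) (high + 1) ∧
        pvHighExtA arr (some M) (high + 1) ≤ (arr.length : Int) - 1 ∧
        (pvHighExtA arr (some M) (high + 1) = (arr.length : Int) - 1 ∨
          M ≤ pvG arr (pvHighExtA arr (some M) (high + 1) + 1)) ∧
        (∀ t : Int, high + 1 < t → t ≤ pvHighExtA arr (some M) (high + 1) → pvG arr t < M) :=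
      pvHighExtA_spec arr M (high + 1) (by omega)
    obtain ⟨a1, a2, a3, a4⟩ := ih
    refine ⟨by omega, a2, a3, ?_⟩
    intro t ht1 ht2
    rcases lt_or_eq_of_le (show high + 1 ≤ t by omega) with hlt | heq
    · exact a4 t hlt ht2
    · rw [← heq]
      have := h.2
      simp only [pvLtO, decide_eq_true_eq] at this
      simpa [pvG] using this
  · rename_i h
    push_neg at h
    refine ⟨le_refl _, h1, ?_, by intro t ht1 ht2; omega⟩
    by_cases hl : high = (arr.length : Int) - 1
    · exact Or.inl hl
    · right
      have := h (by omega)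
      simp [pvLtO] at this
      simp only [pvG]
      omega
termination_by ((arr.length : Int) - 1 - high).toNat
decreasing_by omega
-- snoc form of a countdown range
lemma pvCountdown_snoc (a b : Int) (h : b < a) :
    PySem.List.pyRange a b (-1) = PySem.List.pyRange a (b + 1) (-1) ++ [b + 1] := by
  rw [PySem.List.pyRange_neg_one_eq_reverse, PySem.List.pyRange_neg_one_eq_reverse,
    PySem.List.pyRange_one_cons (by omega : b + 1 < a + 1)]
  simp

lemma pvFoldMM_spec (arr : List Int) (p : Int) :
    ∀ q : Int, p ≤ q →
    ∃ M m : Int,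
      (PySem.List.pyRange p (q + 1) 1).foldl
        (fun st k => (pvMaxO (PySem.List.pyGetD arr k 0) st.1, pvMinO (PySem.List.pyGetD arr k 0) st.2))
        (none, none) = (some M, some m) ∧
      (∃ lM : Int, p ≤ lM ∧ lM ≤ q ∧ pvG arr lM = M) ∧
      (∀ t : Int, p ≤ t → t ≤ q → pvG arr t ≤ M) ∧
      (∃ lm : Int, p ≤ lm ∧ lm ≤ q ∧ pvG arr lm = m) ∧
      (∀ t : Int, p ≤ t → t ≤ q → m ≤ pvG arr t) := by
  have key : ∀ d : Nat, ∀ q : Int, q = p + d →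
      ∃ M m : Int,
      (PySem.List.pyRange p (q + 1) 1).foldl
        (fun st k => (pvMaxO (PySem.List.pyGetD arr k 0) st.1, pvMinO (PySem.List.pyGetD arr k 0) st.2))
        (none, none) = (some M, some m) ∧
      (∃ lM : Int, p ≤ lM ∧ lM ≤ q ∧ pvG arr lM = M) ∧
      (∀ t : Int, p ≤ t → t ≤ q → pvG arr t ≤ M) ∧
      (∃ lm : Int, p ≤ lm ∧ lm ≤ q ∧ pvG arr lm = m) ∧
      (∀ t : Int, p ≤ t → t ≤ q → m ≤ pvG arr t) := by
    intro d
    induction d with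
    | zero =>
      intro q hq
      refine ⟨pvG arr p, pvG arr p, ?_, ⟨p, by omega, by omega, rfl⟩, ?_, ⟨p, by omega, by omega, rfl⟩, ?_⟩
      · have : q = p := by omega
        subst this
        rw [PySem.List.pyRange_one_singleton]
        simp [pvMaxO, pvMinO, pvG]
      · intro t ht1 ht2
        have : t = p := by omega
        subst this; exact le_refl _
      · intro t ht1 ht2
        have : t = p := by omega
        subst this; exact le_refl _
    | succ d ih =>
      intro q hq
      obtain ⟨M, m, hfold, ⟨lM, hlM1, hlM2, hlM3⟩, hMub, ⟨lm, hlm1, hlm2, hlm3⟩, hmlb⟩ :=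
        ih (q - 1) (by push_cast at hq ⊢; omega)
      rw [show q - 1 + 1 = q by omega] at hfold
      refine ⟨max (pvG arr q) M, min (pvG arr q) m, ?_, ?_, ?_, ?_, ?_⟩
      · rw [PySem.List.pyRange_one_succ_right (by push_cast at hq; omega : p ≤ q), List.foldl_append,
          hfold]
        simp [pvMaxO, pvMinO, pvG]
      · rcases le_total (pvG arr q) M with hc | hc
        · exact ⟨lM, hlM1, by omega, by rw [hlM3]; omega⟩
        · exact ⟨q, by push_cast at hq; omega, le_refl _, by omega⟩
      · intro t ht1 ht2
        rcases lt_or_eq_of_le ht2 with hlt | heq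
        · have := hMub t ht1 (by omega); omega
        · subst heq; omega
      · rcases le_total (pvG arr q) m with hc | hc
        · exact ⟨q, by push_cast at hq; omega, le_refl _, by omega⟩
        · exact ⟨lm, hlm1, by omega, by rw [hlm3]; omega⟩
      · intro t ht1 ht2
        rcases lt_or_eq_of_le ht2 with hlt | heq
        · have := hmlb t ht1 (by omega); omega
        · subst heq; omega
  intro q hpq
  exact key (q - p).toNat q (by omega)
lemma pvFoldI_spec (arr : List Int) (b : Int) (hb0 : -1 ≤ b) (hb1 : b ≤ (arr.length : Int) - 1) :
    ((b = (arr.length : Int) - 1 ∧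
        (PySem.List.pyRange ((arr.length : Int) - 1) b (-1)).foldl (pvStepI arr) (none, none) = (none, none)) ∨
      (b < (arr.length : Int) - 1 ∧ ∃ m : Int,
        ((PySem.List.pyRange ((arr.length : Int) - 1) b (-1)).foldl (pvStepI arr) (none, none)).2 = some m ∧
        (∃ l : Int, b < l ∧ l ≤ (arr.length : Int) - 1 ∧ pvG arr l = m) ∧
        (∀ t : Int, b < t → t ≤ (arr.length : Int) - 1 → m ≤ pvG arr t))) ∧
    ((((PySem.List.pyRange ((arr.length : Int) - 1) b (-1)).foldl (pvStepI arr) (none, none)).1 = none ∧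
        ∀ t : Int, b < t → t ≤ (arr.length : Int) - 1 → ¬ pvInv arr t) ∨
      (∃ i : Int,
        ((PySem.List.pyRange ((arr.length : Int) - 1) b (-1)).foldl (pvStepI arr) (none, none)).1 = some i ∧
        b < i ∧ i ≤ (arr.length : Int) - 1 ∧ pvInv arr i ∧
        ∀ t : Int, b < t → t < i → ¬ pvInv arr t)) := by
  by_cases hb : b = (arr.length : Int) - 1
  · rw [PySem.List.pyRange_neg_one_eq_nil (by omega)]
    simp only [List.foldl_nil]
    refine ⟨Or.inl ⟨hb, trivial⟩, Or.inl ⟨trivial, ?_⟩⟩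
    intro t ht1 ht2
    omega
  · obtain ⟨ih1, ih2⟩ := pvFoldI_spec arr (b + 1) (by omega) (by omega)
    rw [pvCountdown_snoc ((arr.length : Int) - 1) b (by omega), List.foldl_append, List.foldl_cons,
      List.foldl_nil]
    rcases ih1 with ⟨hbn, hst⟩ | ⟨hbn, m', hm', ⟨lw, hlw1, hlw2, hlw3⟩, hlb⟩
    · -- b + 1 = len - 1 : first real step, previous state (none, none)
      rw [hst]
      simp only [pvStepI]
      constructor
      · right
        refine ⟨by omega, pvG arr (b + 1), rfl, ⟨b + 1, by omega, by omega, rfl⟩, ?_⟩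
        intro t ht1 ht2
        have : t = b + 1 := by omega
        subst this
        exact le_refl _
      · left
        refine ⟨trivial, ?_⟩
        intro t ht1 ht2
        rintro ⟨l, hl1, hl2, hl3⟩
        omega
    · -- b + 1 < len - 1 : previous suffix min is m'
      simp only [pvStepI, hm']
      have hv : pvG arr (b + 1) = PySem.List.pyGetD arr (b + 1) 0 := rfl
      constructor
      · right
        refine ⟨by omega, ?_⟩
        by_cases hc : PySem.List.pyGetD arr (b + 1) 0 < m'
        · refine ⟨PySem.List.pyGetD arr (b + 1) 0, by simp [hc], ⟨b + 1, by omega, by omega, rfl⟩, ?_⟩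
          intro t ht1 ht2
          rcases eq_or_lt_of_le (show b + 1 ≤ t by omega) with heq | hlt
          · rw [← heq]; exact le_refl _
          · have := hlb t hlt ht2
            simp only [pvG] at this ⊢
            omega
        · refine ⟨m', by simp [hc], ⟨lw, by omega, hlw2, hlw3⟩, ?_⟩
          intro t ht1 ht2
          rcases eq_or_lt_of_le (show b + 1 ≤ t by omega) with heq | hlt
          · rw [← heq]; simp only [pvG]; omega
          · exact hlb t hlt ht2
      · -- the i component
        have hnotinv : ¬ m' < PySem.List.pyGetD arr (b + 1) 0 → ¬ pvInv arr (b + 1) := by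
          intro hle
          rintro ⟨l, hl1, hl2, hl3⟩
          have := hlb l hl1 (by omega)
          simp only [pvG] at this hl3
          omega
        have hinv : m' < PySem.List.pyGetD arr (b + 1) 0 → pvInv arr (b + 1) := by
          intro hlt
          exact ⟨lw, by omega, by omega, by simp only [pvG] at hlw3 ⊢; omega⟩
        by_cases hc : m' < PySem.List.pyGetD arr (b + 1) 0
        · right
          refine ⟨b + 1, by simp [hc], by omega, by omega, hinv hc, ?_⟩
          intro t ht1 ht2
          omega
        · rcases ih2 with ⟨hnone, hno⟩ | ⟨i', hi', hi1, hi2, hi3, hi4⟩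
          · left
            refine ⟨by simp [hc, hnone], ?_⟩
            intro t ht1 ht2
            rcases eq_or_lt_of_le (show b + 1 ≤ t by omega) with heq | hlt
            · rw [← heq]; exact hnotinv hc
            · exact hno t hlt ht2
          · right
            refine ⟨i', by simp [hc, hi'], by omega, hi2, hi3, ?_⟩
            intro t ht1 ht2
            rcases eq_or_lt_of_le (show b + 1 ≤ t by omega) with heq | hlt
            · rw [← heq]; exact hnotinv hc
            · exact hi4 t hlt ht2
termination_by ((arr.length : Int) - 1 - b).toNat
decreasing_by omega
lemma pvFoldJ_spec (arr : List Int) (c : Int) (hc0 : 0 ≤ c) (hc1 : c ≤ (arr.length : Int)) :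
    ((c = 0 ∧ ((PySem.List.pyRange 0 c 1).foldl (pvStepJ arr) (0, none)).2 = none) ∨
      (0 < c ∧ ∃ M : Int,
        ((PySem.List.pyRange 0 c 1).foldl (pvStepJ arr) (0, none)).2 = some M ∧
        (∃ l : Int, 0 ≤ l ∧ l < c ∧ pvG arr l = M) ∧
        (∀ t : Int, 0 ≤ t → t < c → pvG arr t ≤ M))) ∧
    (0 ≤ ((PySem.List.pyRange 0 c 1).foldl (pvStepJ arr) (0, none)).1 ∧
      (((PySem.List.pyRange 0 c 1).foldl (pvStepJ arr) (0, none)).1 = 0 ∨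
        (((PySem.List.pyRange 0 c 1).foldl (pvStepJ arr) (0, none)).1 < c ∧
          pvJnv arr ((PySem.List.pyRange 0 c 1).foldl (pvStepJ arr) (0, none)).1)) ∧
      (∀ t : Int, ((PySem.List.pyRange 0 c 1).foldl (pvStepJ arr) (0, none)).1 < t → t < c →
        ¬ pvJnv arr t)) := by
  by_cases hc : c = 0
  · subst hc
    rw [PySem.List.pyRange_one_eq_nil (by omega)]
    simp only [List.foldl_nil]
    exact ⟨Or.inl ⟨by trivial, by trivial⟩, le_refl _, Or.inl (by trivial), by intro t ht1 ht2; exfalso; omega⟩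
  · obtain ⟨ih1, ih2, ih3, ih4⟩ := pvFoldJ_spec arr (c - 1) (by omega) (by omega)
    have hsplit : PySem.List.pyRange 0 c 1 = PySem.List.pyRange 0 (c - 1) 1 ++ [c - 1] := by
      have := PySem.List.pyRange_one_succ_right (a := 0) (b := c - 1) (by omega)
      rwa [show c - 1 + 1 = c by omega] at this
    rw [hsplit, List.foldl_append, List.foldl_cons, List.foldl_nil]
    rcases ih1 with ⟨hc1', hpm⟩ | ⟨hc1', M', hM', ⟨lw, hlw1, hlw2, hlw3⟩, hub⟩
    · -- c - 1 = 0 : first step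
      have hj0 : ((PySem.List.pyRange 0 (c - 1) 1).foldl (pvStepJ arr) (0, none)).1 = 0 := by
        rcases ih3 with h | h
        · exact h
        · omega
      simp only [pvStepJ, hpm, hj0]
      refine ⟨Or.inr ⟨by omega, PySem.List.pyGetD arr (c - 1) 0, rfl, ⟨c - 1, by omega, by omega, rfl⟩, ?_⟩, by omega, Or.inl (trivial), ?_⟩
      · intro t ht1 ht2
        have : t = c - 1 := by omega
        subst this
        exact le_refl _
      · intro t ht1 ht2
        exfalso
        omega
    · -- 0 < c - 1 : previous prefix max is M'
      simp only [pvStepJ, hM']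
      have hnotj : ¬ PySem.List.pyGetD arr (c - 1) 0 < M' → ¬ pvJnv arr (c - 1) := by
        intro hge
        rintro ⟨l, hl1, hl2, hl3⟩
        have := hub l hl1 (by omega)
        simp only [pvG] at this hl3
        omega
      constructor
      · refine Or.inr ⟨by omega, ?_⟩
        by_cases hm : M' < PySem.List.pyGetD arr (c - 1) 0
        · refine ⟨PySem.List.pyGetD arr (c - 1) 0, by simp [hm], ⟨c - 1, by omega, by omega, rfl⟩, ?_⟩
          intro t ht1 ht2
          rcases eq_or_lt_of_le (show t ≤ c - 1 by omega) with heq | hlt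
          · subst heq; exact le_refl _
          · have := hub t ht1 hlt
            simp only [pvG] at this ⊢
            omega
        · refine ⟨M', by simp [hm], ⟨lw, hlw1, by omega, hlw3⟩, ?_⟩
          intro t ht1 ht2
          rcases eq_or_lt_of_le (show t ≤ c - 1 by omega) with heq | hlt
          · subst heq; simp only [pvG]; omega
          · exact hub t ht1 hlt
      · by_cases hv : PySem.List.pyGetD arr (c - 1) 0 < M'
        · have hJ : pvJnv arr (c - 1) := ⟨lw, hlw1, by omega, by simp only [pvG] at hlw3 ⊢; omega⟩
          refine ⟨by rw [if_pos hv]; omega, Or.inr (by rw [if_pos hv]; exact ⟨by omega, hJ⟩), ?_⟩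
          intro t ht1 ht2
          rw [if_pos hv] at ht1
          exfalso
          omega
        · refine ⟨by rw [if_neg hv]; exact ih2, ?_, ?_⟩
          · rcases ih3 with h | h
            · exact Or.inl (by rw [if_neg hv]; exact h)
            · exact Or.inr (by rw [if_neg hv]; exact ⟨by omega, h.2⟩)
          · intro t ht1 ht2
            rw [if_neg hv] at ht1
            rcases eq_or_lt_of_le (show t ≤ c - 1 by omega) with heq | hlt
            · subst heq; exact hnotj hv
            · exact ih4 t ht1 hlt
termination_by c.toNat
decreasing_by omega
lemma pvA_nil : min_window_sort [] = 0 := by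
  unfold min_window_sort
  rw [pvLowA]
  norm_num
  rw [pvHighA]
  norm_num
  rw [pvLowExtA, pvHighExtA]
  norm_num

lemma pvB_nil : min_window_sort_alt [] = 0 := by
  unfold min_window_sort_alt
  norm_num [PySem.List.pyRange_neg_one_eq_nil]

-- ===== VERDICT (by name: the statement is the Claim_ definition above) =====
theorem min_window_sort_spec : Claim_equal_min_window_sort := by
  intro arr _
  unfold Spec_min_window_sort
  by_cases hn : arr = []
  · subst hn
    rw [pvA_nil, pvB_nil]
  · have hn1 : 1 ≤ (arr.length : Int) := by
      have : arr.length ≠ 0 := fun h => hn (List.eq_nil_of_length_eq_zero h)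
      omega
    obtain ⟨p0, pLow, pHi, pAsc, pEnd⟩ :=
      pvLowA_spec arr 0 (le_refl 0) (by omega) (by intro t ht1 ht2; omega)
    obtain ⟨hI1, hI2⟩ := pvFoldI_spec arr (-1) (by omega) (by omega)
    simp only [min_window_sort, min_window_sort_alt]
    by_cases hsorted : pvLowA arr 0 = (arr.length : Int) - 1
    · -- array already ascending: A returns 0, B's first sweep finds no index
      rw [if_pos hsorted]
      have monoAll : ∀ s u : Int, 0 ≤ s → s ≤ u → u ≤ (arr.length : Int) - 1 →
          pvG arr s ≤ pvG arr u := by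
        refine pvMonoGen arr 0 ((arr.length : Int) - 1) ?_
        intro t ht1 ht2
        exact pAsc t ht1 (by omega)
      rcases hI2 with ⟨hnone, _⟩ | ⟨i, hsome, hi1, hi2, ⟨l, hl1, hl2, hl3⟩, _⟩
      · rw [hnone]
      · exfalso
        have := monoAll i l (by omega) (by omega) (by omega)
        omega
    · -- not sorted
      rw [if_neg hsorted]
      have pLt : pvLowA arr 0 < (arr.length : Int) - 1 := by omega
      have pEnd' : pvG arr (pvLowA arr 0 + 1) < pvG arr (pvLowA arr 0) := by
        rcases pEnd with h | h
        · exact absurd h hsorted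
        · exact h
      obtain ⟨q0, qLe, qAsc, qEnd⟩ :=
        pvHighA_spec arr ((arr.length : Int) - 1) (by omega) (le_refl _)
          (by intro t ht1 ht2; omega)
      have hpq : pvLowA arr 0 + 1 ≤ pvHighA arr ((arr.length : Int) - 1) := by
        by_contra hcon
        have := qAsc (pvLowA arr 0) (by omega) (by omega)
        omega
      have qEnd' : pvG arr (pvHighA arr ((arr.length : Int) - 1)) <
          pvG arr (pvHighA arr ((arr.length : Int) - 1) - 1) := by
        rcases qEnd with h | h
        · exfalso
          have := qAsc (pvLowA arr 0) (by omega) (by omega)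
          omega
        · exact h
      obtain ⟨M, m, hfold, ⟨lM, hlM1, hlM2, hlM3⟩, hMub, ⟨lm, hlm1, hlm2, hlm3⟩, hmlb⟩ :=
        pvFoldMM_spec arr (pvLowA arr 0) (pvHighA arr ((arr.length : Int) - 1)) (by omega)
      rw [hfold]
      simp only
      obtain ⟨L0, LLe, LEnd, LAll⟩ := pvLowExtA_spec arr m (pvLowA arr 0) p0
      obtain ⟨HGe, HLe, HEnd, HAll⟩ :=
        pvHighExtA_spec arr M (pvHighA arr ((arr.length : Int) - 1)) qLe
      set p := pvLowA arr 0 with hp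
      set q := pvHighA arr ((arr.length : Int) - 1) with hq
      set L := pvLowExtA arr (some m) p with hL
      set H := pvHighExtA arr (some M) q with hH
      have monoP : ∀ s u : Int, 0 ≤ s → s ≤ u → u ≤ p → pvG arr s ≤ pvG arr u :=
        pvMonoGen arr 0 p (fun t ht1 ht2 => pAsc t ht1 ht2)
      have monoS : ∀ s u : Int, q ≤ s → s ≤ u → u ≤ (arr.length : Int) - 1 →
          pvG arr s ≤ pvG arr u := pvMonoGen arr q ((arr.length : Int) - 1) qAsc
      have inv_L : pvInv arr L := by
        rcases eq_or_lt_of_le LLe with heq | hlt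
        · rw [heq]
          exact ⟨p + 1, by omega, by omega, pEnd'⟩
        · have hGL := LAll L (le_refl _) hlt
          exact ⟨lm, by omega, by omega, by omega⟩
      have noinv_below : ∀ t : Int, 0 ≤ t → t < L → ¬ pvInv arr t := by
        intro t ht1 ht2
        rintro ⟨l, hl1, hl2, hl3⟩
        have hLpos : pvG arr (L - 1) ≤ m := by
          rcases LEnd with h | h
          · omega
          · exact h
        have hGt : pvG arr t ≤ m := by
          have := monoP t (L - 1) ht1 (by omega) (by omega)
          omega
        rcases le_or_gt l p with hc | hc
        · have := monoP t l ht1 (by omega) hc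
          omega
        · rcases le_or_gt l q with hc2 | hc2
          · have := hmlb l (by omega) hc2
            omega
          · have h1 := hmlb q (by omega) (le_refl _)
            have h2 := monoS q l (le_refl _) (by omega) (by omega)
            omega
      have jnv_H : pvJnv arr H := by
        rcases eq_or_lt_of_le HGe with heq | hlt
        · rw [← heq]
          exact ⟨q - 1, by omega, by omega, qEnd'⟩
        · have hGH := HAll H hlt (le_refl _)
          exact ⟨lM, by omega, by omega, by omega⟩
      have nojnv_above : ∀ t : Int, H < t → t ≤ (arr.length : Int) - 1 → ¬ pvJnv arr t := by
        intro t ht1 ht2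
        rintro ⟨l, hl1, hl2, hl3⟩
        have hHend : M ≤ pvG arr (H + 1) := by
          rcases HEnd with h | h
          · omega
          · exact h
        have hGt : M ≤ pvG arr t := by
          have := monoS (H + 1) t (by omega) (by omega) ht2
          omega
        rcases le_or_gt l p with hc | hc
        · have h1 := monoP l p (by omega) hc (le_refl _)
          have h2 := hMub p (le_refl _) (by omega)
          omega
        · rcases le_or_gt l q with hc2 | hc2
          · have := hMub l (by omega) hc2
            omega
          · have := monoS l t (by omega) (by omega) ht2
            omega
      -- B's first sweep finds exactly L
      rcases hI2 with ⟨hnone, hno⟩ | ⟨i, hsome, hi1, hi2, hi3, hi4⟩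
      · exfalso
        exact hno L (by omega) (by omega) inv_L
      · have hiL : i = L := by
          rcases lt_trichotomy i L with h | h | h
          · exact absurd hi3 (noinv_below i (by omega) h)
          · exact h
          · exact absurd inv_L (hi4 L (by omega) h)
        rw [hsome]
        simp only
        -- B's second sweep finds exactly H
        obtain ⟨_, j0, jOr, jNone⟩ := pvFoldJ_spec arr (arr.length : Int) (by omega) (le_refl _)
        have hjH : ((PySem.List.pyRange 0 (arr.length : Int) 1).foldl (pvStepJ arr) (0, none)).1 = H := by
          rcases jOr with h | ⟨hlt, hJ⟩
          · exfalso
            exact jNone H (by omega) (by omega) jnv_H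
          · rcases lt_trichotomy ((PySem.List.pyRange 0 (arr.length : Int) 1).foldl (pvStepJ arr) (0, none)).1 H with h | h | h
            · exact absurd jnv_H (jNone H h (by omega))
            · exact h
            · exact absurd hJ (nojnv_above _ h (by omega))
        rw [hjH, hiL]
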